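-- pv_equiv track=rewrite | github.com/adafdelcid/Whole-Enrichment | Whole_Enrichment.py | get_column_names_organ_sheets
-- ===== SOURCE A (Python) =====
-- def get_column_names_organ_sheets(d_samples_by_cell_type, list_organs, sample_numbers):
--     """
--     get_column_names_organ_sheets : creates a dictionary with column names for organ sheets
--         inputs:
--             d_samples_by_cell_type : samples organized by cell type
--             list_organs : list of organs sorted
--             sample_numbers : numbers with sample values for an experiment
--         output:
--             d_organ_sheet_columns : creates a dictionary with the name of the columns for each organ sheet
--     """
--     d_organs_d_cell_types_samples = get_dict_organs_by_cell_type(d_samples_by_cell_type, list_organs)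
--     d_organ_sheet_columns = {}
--
--     for organ in list_organs:
--         cell_type_samples = d_organs_d_cell_types_samples[organ]
--         temp_dict = {}
--         for sample_num in sample_numbers:
--             temp_list = []
--             for cell_type in cell_type_samples:
--                 for sample in cell_type_samples[cell_type]:
--                     if sample_num in sample:
--                         temp_list.append(sample)
--             if len(temp_list) != 0:
--                 temp_dict[sample_num] = temp_list
--
--         d_organ_sheet_columns[organ] = temp_dict
--
--     return d_organ_sheet_columns
--
-- def get_dict_organs_by_cell_type(d_samples_by_cell_type, list_organs):
--     """
--     get_dict_organs_by_cell_type : creates a dictionary with organ keys and samples of that organ organized by cell type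
--         inputs:
--             d_samples_by_cell_type : samples organized by cell type
--             list_organs : list of organs sorted
--         output:
--             d_organs_by_cell_type : dictionary of organs with samples organized by cell type within organ
--     """
--     d_organs_by_cell_type = {}
--
--     for organ in list_organs:
--         d_organs_by_cell_type[organ] = {}
--         for sample_cell_type in d_samples_by_cell_type:
--             if sample_cell_type[0] == organ:
--                 d_organs_by_cell_type[organ][sample_cell_type] = d_samples_by_cell_type[sample_cell_type]
--
--     return d_organs_by_cell_type
-- ===== SOURCE B (Python) =====
-- def get_column_names_organ_sheets(d_samples_by_cell_type, list_organs, sample_numbers):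
--     """One forward pass over the samples dict instead of helper-then-triple-loop."""
--     uniq_nums = list(dict.fromkeys(sample_numbers))
--     buckets = {organ: {} for organ in list_organs}
--     for cell_type, samples in d_samples_by_cell_type.items():
--         organ = cell_type[0]
--         if organ in buckets:
--             for sample in samples:
--                 for num in uniq_nums:
--                     if num in sample:
--                         buckets[organ].setdefault(num, []).append(sample)
--     return {organ: {num: cols[num] for num in sample_numbers if num in cols}
--             for organ, cols in buckets.items()}
-- ===== Notes on version B (the rewrite author's own statement) =====
-- stated objective: faster
-- what changed: B replaces A's helper dict plus per-organ/per-sample_num rescans of the whole samples dict with a single forward populate pass over the samples dict (appending each sample to its organ's bucket per matching sample number) followed by one reordering pass per organ in sample_numbers order.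
import Mathlib
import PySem

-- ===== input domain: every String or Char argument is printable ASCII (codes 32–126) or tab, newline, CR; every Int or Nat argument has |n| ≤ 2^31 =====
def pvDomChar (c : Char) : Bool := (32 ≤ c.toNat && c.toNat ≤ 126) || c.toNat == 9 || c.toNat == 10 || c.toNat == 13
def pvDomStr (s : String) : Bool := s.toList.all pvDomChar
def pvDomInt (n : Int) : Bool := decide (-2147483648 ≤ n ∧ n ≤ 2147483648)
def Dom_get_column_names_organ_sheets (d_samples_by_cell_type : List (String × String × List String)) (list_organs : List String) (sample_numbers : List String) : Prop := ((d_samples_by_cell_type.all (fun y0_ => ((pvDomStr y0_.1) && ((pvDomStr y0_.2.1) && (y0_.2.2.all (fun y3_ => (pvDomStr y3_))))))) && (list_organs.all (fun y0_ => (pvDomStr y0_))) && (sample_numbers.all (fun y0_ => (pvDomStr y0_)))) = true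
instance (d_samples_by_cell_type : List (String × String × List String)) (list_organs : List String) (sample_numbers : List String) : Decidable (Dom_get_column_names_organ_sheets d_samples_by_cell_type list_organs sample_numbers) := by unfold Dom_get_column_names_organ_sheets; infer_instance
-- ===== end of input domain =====

-- B replaces A's helper-dict-plus-triple-loop with one forward populate pass over the
-- samples dict followed by a per-organ reordering pass (objective: faster).

-- ===== PORT A =====
-- Both ports receive the Python dict argument as an association list of triples
-- ((organ, cell_type) ↦ samples); like the Python caller's dict, duplicate keys
-- collapse (first position, last value): PySem.Dict.ofList.
def pvEntries (d_samples_by_cell_type : List (String × String × List String)) : List ((String × String) × List String) :=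
  (PySem.Dict.ofList (d_samples_by_cell_type.map (fun t => ((t.1, t.2.1), t.2.2)))).items

-- helper get_dict_organs_by_cell_type of A
def pvDictOrgans (entries : List ((String × String) × List String)) (list_organs : List String) :
    PySem.Dict String (PySem.Dict (String × String) (List String)) :=
  list_organs.foldl (fun acc organ =>
      entries.foldl (fun acc e =>
          if e.1.1 == organ then
            acc.modify organ PySem.Dict.empty (fun inner => inner.insert e.1 e.2)
          else acc)
        (acc.insert organ PySem.Dict.empty))
    PySem.Dict.empty

def get_column_names_organ_sheets (d_samples_by_cell_type : List (String × String × List String)) (list_organs : List String) (sample_numbers : List String) : List (String × List (String × List String)) :=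
  let entries := pvEntries d_samples_by_cell_type
  let dOrg := pvDictOrgans entries list_organs
  (list_organs.foldl (fun res organ =>
      let cts := (dOrg.get? organ).getD PySem.Dict.empty
      let temp := sample_numbers.foldl (fun td num =>
          -- 'for cell_type in cell_type_samples: for sample in cell_type_samples[cell_type]':
          -- iterating the dict's (unique) keys and looking each up is iterating its items
          let tl := cts.items.foldl
              (fun l p => p.2.foldl (fun l s => if PySem.Str.isIn num s then l ++ [s] else l) l) []
          if tl.length != 0 then td.insert num tl else td)
        PySem.Dict.empty
      res.insert organ temp.items)
    PySem.Dict.empty).items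

-- ===== PORT B =====
def get_column_names_organ_sheets_alt (d_samples_by_cell_type : List (String × String × List String)) (list_organs : List String) (sample_numbers : List String) : List (String × List (String × List String)) :=
  let entries := pvEntries d_samples_by_cell_type
  let uniq := PySem.List.dedup sample_numbers
  let buckets0 : PySem.Dict String (PySem.Dict String (List String)) :=
    list_organs.foldl (fun b o => b.insert o PySem.Dict.empty) PySem.Dict.empty
  let buckets := entries.foldl (fun b e =>
      if b.contains e.1.1 then
        e.2.foldl (fun b s =>
            uniq.foldl (fun b num =>
                if PySem.Str.isIn num s then
                  b.modify e.1.1 PySem.Dict.empty (fun cols => cols.modify num [] (· ++ [s]))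
                else b) b) b
      else b) buckets0
  (buckets.items.foldl (fun res p =>
      res.insert p.1
        ((sample_numbers.foldl (fun td num =>
            if p.2.contains num then td.insert num (p.2.getD num []) else td)
          PySem.Dict.empty).items))
    PySem.Dict.empty).items

-- ===== PRECONDITION & SPEC =====
def Spec_get_column_names_organ_sheets (d_samples_by_cell_type : List (String × String × List String)) (list_organs : List String) (sample_numbers : List String) (out : List (String × List (String × List String))) : Prop := out = get_column_names_organ_sheets_alt d_samples_by_cell_type list_organs sample_numbers
instance (d_samples_by_cell_type : List (String × String × List String)) (list_organs : List String) (sample_numbers : List String) (out : List (String × List (String × List String))) : Decidable (Spec_get_column_names_organ_sheets d_samples_by_cell_type list_organs sample_numbers out) := by unfold Spec_get_column_names_organ_sheets; infer_instance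

-- ===== CLAIM (what is proved, stated in full; the proofs are below) =====
def Claim_equal_get_column_names_organ_sheets : Prop := ∀ (d_samples_by_cell_type : List (String × String × List String)) (list_organs : List String) (sample_numbers : List String), Dom_get_column_names_organ_sheets d_samples_by_cell_type list_organs sample_numbers → Spec_get_column_names_organ_sheets d_samples_by_cell_type list_organs sample_numbers (get_column_names_organ_sheets d_samples_by_cell_type list_organs sample_numbers)

-- ===== LEMMAS AND PROOFS =====

-- the samples of one organ, in dict order, and those containing one sample number
def pvSamplesOf (entries : List ((String × String) × List String)) (o : String) : List String :=
  (entries.filter (fun e => e.1.1 == o)).flatMap (fun e => e.2)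

def pvFlt (entries : List ((String × String) × List String)) (o num : String) : List String :=
  (pvSamplesOf entries o).filter (fun s => PySem.Str.isIn num s)

-- the common normal form both ports are reduced to
def pvInnerCanon (entries : List ((String × String) × List String)) (sample_numbers : List String) (o : String) : List (String × List String) :=
  (PySem.List.dedup (sample_numbers.filter (fun num => (pvFlt entries o num).length != 0))).map
    (fun num => (num, pvFlt entries o num))

def pvCanon (d_samples_by_cell_type : List (String × String × List String)) (list_organs : List String) (sample_numbers : List String) : List (String × List (String × List String)) :=
  (PySem.List.dedup list_organs).map
    (fun o => (o, pvInnerCanon (pvEntries d_samples_by_cell_type) sample_numbers o))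

-- A's inner per-organ dict
def pvFill (entries : List ((String × String) × List String)) (o : String) : PySem.Dict (String × String) (List String) :=
  (entries.filter (fun e => e.1.1 == o)).foldl (fun inn e => inn.insert e.1 e.2) PySem.Dict.empty

-- B's per-organ bucket
def pvPopCols (uniq : List String) (S : List String) (cols : PySem.Dict String (List String)) : PySem.Dict String (List String) :=
  S.foldl (fun cols s =>
      uniq.foldl (fun cols num =>
          if PySem.Str.isIn num s then cols.modify num [] (· ++ [s]) else cols) cols) cols

def pvBucket (uniq : List String) (entries : List ((String × String) × List String)) (o : String) : PySem.Dict String (List String) :=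
  pvPopCols uniq (pvSamplesOf entries o) PySem.Dict.empty

-- ---- generic dictionary-fold lemmas ----

lemma pv_get?_modify_self {κ ν : Type} [BEq κ] [LawfulBEq κ] (d : PySem.Dict κ ν) (k : κ) (d0 : ν) (f : ν → ν) :
    (d.modify k d0 f).get? k = some (f (d.getD k d0)) := by
  simp [PySem.Dict.modify, PySem.Dict.get?_insert_self]

lemma pv_get?_modify_of_ne {κ ν : Type} [BEq κ] [LawfulBEq κ] (d : PySem.Dict κ ν) {k k' : κ} (d0 : ν) (f : ν → ν) (h : k' ≠ k) :
    (d.modify k d0 f).get? k' = d.get? k' := by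
  simp [PySem.Dict.modify, PySem.Dict.get?_insert_of_ne _ _ h]

lemma pv_contains_eq_any_keys {κ ν : Type} [BEq κ] (d : PySem.Dict κ ν) (k : κ) :
    d.contains k = d.keys.any (· == k) := by
  simp [PySem.Dict.contains, PySem.Dict.keys, List.any_map]
  rfl

lemma pv_keys_modify_of_contains {κ ν : Type} [BEq κ] [LawfulBEq κ] (d : PySem.Dict κ ν) (k : κ) (d0 : ν) (f : ν → ν)
    (h : d.contains k = true) : (d.modify k d0 f).keys = d.keys := by
  simp only [PySem.Dict.modify, PySem.Dict.insert, h, if_true, PySem.Dict.keys, List.map_map]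
  refine List.map_congr_left (fun p _ => ?_)
  by_cases hp : p.1 == k
  · simp [(eq_of_beq hp).symm]
  · simp [hp]

lemma pv_get?_foldl_insert_fun {κ ν : Type} [BEq κ] [LawfulBEq κ] (g : κ → ν) (l : List κ) (d : PySem.Dict κ ν) (k : κ) :
    (l.foldl (fun d o => d.insert o (g o)) d).get? k = if k ∈ l then some (g k) else d.get? k := by
  induction l generalizing d with
  | nil => simp
  | cons a l ih =>
    simp only [List.foldl_cons]
    rw [ih]
    by_cases hl : k ∈ l
    · simp [hl]
    · by_cases hk : k = a
      · subst hk; simp [hl, PySem.Dict.get?_insert_self]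
      · simp [hl, hk, PySem.Dict.get?_insert_of_ne _ _ hk]

lemma pv_set_update_nil_eq_dedup {α : Type} [BEq α] (l : List α) :
    PySem.Set.update ([] : PySem.Set α) l = PySem.List.dedup l := by
  rw [PySem.List.dedup_eq_ofList]; rfl

lemma pv_items_foldl_insert_fun {κ ν : Type} [BEq κ] [LawfulBEq κ] (g : κ → ν) (l : List κ) (v0 : ν) :
    (l.foldl (fun d o => d.insert o (g o)) PySem.Dict.empty).items
      = (PySem.List.dedup l).map (fun o => (o, g o)) := by
  have hk : (l.foldl (fun d o => d.insert o (g o)) PySem.Dict.empty).keys = PySem.List.dedup l := by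
    rw [PySem.Dict.keys_foldl_insert l (fun _ o => g o), PySem.Dict.keys_empty,
      pv_set_update_nil_eq_dedup]
  have hnd : (l.foldl (fun d o => d.insert o (g o)) PySem.Dict.empty).keys.Nodup := by
    rw [hk]; exact PySem.List.nodup_dedup l
  rw [PySem.Dict.items_eq_map_keys _ hnd v0, hk]
  refine List.map_congr_left (fun o ho => ?_)
  have hol : o ∈ l := (PySem.List.mem_dedup l o).1 ho
  simp [PySem.Dict.getD, pv_get?_foldl_insert_fun, hol]

lemma pv_get?_foldl_guard_modify_ne {κ ν α : Type} [BEq κ] [LawfulBEq κ] (L : List α) (q : α → Bool) (k k' : κ)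
    (d0 : ν) (f : ν → α → ν) (d : PySem.Dict κ ν) (h : k' ≠ k) :
    (L.foldl (fun d x => if q x then d.modify k d0 (fun v => f v x) else d) d).get? k' = d.get? k' := by
  induction L generalizing d with
  | nil => rfl
  | cons x L ih =>
    simp only [List.foldl_cons]
    rw [ih]
    by_cases hq : q x = true
    · simp [hq, pv_get?_modify_of_ne _ _ _ h]
    · simp [hq]

lemma pv_get?_foldl_guard_modify_self {κ ν α : Type} [BEq κ] [LawfulBEq κ] (L : List α) (q : α → Bool) (k : κ)
    (d0 : ν) (f : ν → α → ν) (d : PySem.Dict κ ν) (inn : ν) (h : d.get? k = some inn) :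
    (L.foldl (fun d x => if q x then d.modify k d0 (fun v => f v x) else d) d).get? k
      = some (L.foldl (fun v x => if q x then f v x else v) inn) := by
  induction L generalizing d inn with
  | nil => simpa using h
  | cons x L ih =>
    simp only [List.foldl_cons]
    by_cases hq : q x = true
    · simp only [hq, if_true]
      exact ih _ (f inn x) (by rw [pv_get?_modify_self]; simp [PySem.Dict.getD, h])
    · simp only [hq]
      exact ih d inn h

lemma pv_keys_foldl_guard_modify {κ ν α : Type} [BEq κ] [LawfulBEq κ] (L : List α) (q : α → Bool) (k : κ)
    (d0 : ν) (f : ν → α → ν) (d : PySem.Dict κ ν) (h : d.contains k = true) :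
    (L.foldl (fun d x => if q x then d.modify k d0 (fun v => f v x) else d) d).keys = d.keys := by
  induction L generalizing d with
  | nil => rfl
  | cons x L ih =>
    simp only [List.foldl_cons]
    by_cases hq : q x = true
    · simp only [hq, if_true]
      rw [ih _ (by rw [pv_contains_eq_any_keys, pv_keys_modify_of_contains _ _ _ _ h,
            ← pv_contains_eq_any_keys]; exact h),
        pv_keys_modify_of_contains _ _ _ _ h]
    · simp only [hq]
      exact ih d h

-- ---- A-side lemmas ----

lemma pv_nodup_keys_entries (d : List (String × String × List String)) :
    ((pvEntries d).map (fun e => e.1)).Nodup := by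
  have h := PySem.Dict.nodup_keys_foldl_insert_key (κ := String × String) (ν := List String)
      (d.map (fun t => ((t.1, t.2.1), t.2.2))) (fun p => p.1) (fun _ p => p.2) PySem.Dict.empty
      (by rw [PySem.Dict.keys_empty]; exact List.nodup_nil)
  simpa [pvEntries, PySem.Dict.ofList, PySem.Dict.update, PySem.Dict.keys] using h

lemma pv_get?_dictOrgans (entries : List ((String × String) × List String)) (lo : List String)
    (d : PySem.Dict String (PySem.Dict (String × String) (List String))) (o : String) :
    (lo.foldl (fun acc organ =>
        entries.foldl (fun acc e =>
            if e.1.1 == organ then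
              acc.modify organ PySem.Dict.empty (fun inner => inner.insert e.1 e.2)
            else acc)
          (acc.insert organ PySem.Dict.empty)) d).get? o
      = if o ∈ lo then some (pvFill entries o) else d.get? o := by
  induction lo generalizing d with
  | nil => simp
  | cons a lo ih =>
    simp only [List.foldl_cons]
    rw [ih]
    by_cases hl : o ∈ lo
    · simp [hl]
    · by_cases hk : o = a
      · subst hk
        rw [pv_get?_foldl_guard_modify_self entries (fun e => e.1.1 == o) o PySem.Dict.empty
            (fun v e => v.insert e.1 e.2) _ PySem.Dict.empty (PySem.Dict.get?_insert_self _ _ _)]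
        simp [hl, pvFill, List.foldl_filter]
      · rw [pv_get?_foldl_guard_modify_ne entries (fun e => e.1.1 == a) a o PySem.Dict.empty
            (fun v e => v.insert e.1 e.2) _ hk,
          PySem.Dict.get?_insert_of_ne _ _ hk]
        simp [hl, hk]

lemma pv_items_pvFill (entries : List ((String × String) × List String))
    (hnd : (entries.map (fun e => e.1)).Nodup) (o : String) :
    (pvFill entries o).items = entries.filter (fun e => e.1.1 == o) := by
  unfold pvFill
  rw [PySem.Dict.items_foldl_insert_fresh (entries.filter (fun e => e.1.1 == o))
      (fun e => e.1) (fun e => e.2) PySem.Dict.empty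
      (fun a _ => by simp [PySem.Dict.contains, PySem.Dict.empty])
      (hnd.sublist (List.Sublist.map _ List.filter_sublist))]
  simp [PySem.Dict.empty]

lemma pv_foldl_append_if_flat (ls : List ((String × String) × List String)) (q : String → Bool) :
    ls.foldl (fun l p => p.2.foldl (fun l s => if q s then l ++ [s] else l) l) []
      = (ls.flatMap (fun p => p.2)).filter q := by
  rw [← List.foldl_flatMap]
  have h := PySem.List.foldl_append_if q (fun s => s) (ls.flatMap (fun p => p.2)) []
  simpa using h

lemma pv_flt_eq (entries : List ((String × String) × List String)) (o num : String) :
    ((entries.filter (fun e => e.1.1 == o)).flatMap (fun p => p.2)).filter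
        (fun s => PySem.Str.isIn num s) = pvFlt entries o num := rfl

lemma pv_A_eq_canon (d : List (String × String × List String)) (lo sn : List String) :
    get_column_names_organ_sheets d lo sn = pvCanon d lo sn := by
  unfold get_column_names_organ_sheets pvCanon
  rw [pv_items_foldl_insert_fun _ _ []]
  refine List.map_congr_left (fun o ho => ?_)
  have hol : o ∈ lo := (PySem.List.mem_dedup lo o).1 ho
  unfold pvDictOrgans
  rw [pv_get?_dictOrgans (pvEntries d) lo PySem.Dict.empty o, if_pos hol]
  simp only [Option.getD_some,
    pv_items_pvFill (pvEntries d) (pv_nodup_keys_entries d) o,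
    pv_foldl_append_if_flat, pv_flt_eq]
  rw [← List.foldl_filter, pv_items_foldl_insert_fun _ _ []]
  rfl

-- ---- B-side lemmas ----

lemma pv_get?_numfold_not_mem (s : String) (l : List String) (cols : PySem.Dict String (List String)) (num : String)
    (h : num ∉ l) :
    (l.foldl (fun cols n => if PySem.Str.isIn n s then cols.modify n [] (· ++ [s]) else cols) cols).get? num
      = cols.get? num := by
  induction l generalizing cols with
  | nil => rfl
  | cons n l ih =>
    simp only [List.foldl_cons]
    have hn : num ≠ n := fun he => h (he ▸ List.mem_cons_self)
    have hl : num ∉ l := fun hm => h (List.mem_cons_of_mem _ hm)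
    rw [ih _ hl]
    by_cases hq : PySem.Str.isIn n s = true
    · rw [if_pos hq]
      exact pv_get?_modify_of_ne _ _ _ hn
    · rw [if_neg hq]

lemma pv_get?_numfold_self (uniq : List String) (hnd : uniq.Nodup) (s : String)
    (cols : PySem.Dict String (List String)) (num : String) (hm : num ∈ uniq) :
    (uniq.foldl (fun cols n => if PySem.Str.isIn n s then cols.modify n [] (· ++ [s]) else cols) cols).get? num
      = if PySem.Str.isIn num s then some (cols.getD num [] ++ [s]) else cols.get? num := by
  induction uniq generalizing cols with
  | nil => cases hm
  | cons n l ih =>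
    have hnd' : l.Nodup := hnd.of_cons
    simp only [List.foldl_cons]
    by_cases hk : num = n
    · subst hk
      have hnotmem : num ∉ l := (List.nodup_cons.1 hnd).1
      rw [pv_get?_numfold_not_mem s l _ num hnotmem]
      by_cases hq : PySem.Str.isIn num s = true
      · rw [if_pos hq, if_pos hq, pv_get?_modify_self]
      · rw [if_neg hq, if_neg hq]
    · have hml : num ∈ l := (List.mem_cons.1 hm).resolve_left hk
      by_cases hq : PySem.Str.isIn n s = true
      · rw [if_pos hq, ih hnd' _ hml,
          PySem.Dict.getD_modify_of_ne cols [] _ hk, pv_get?_modify_of_ne _ _ _ hk]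
      · rw [if_neg hq]
        exact ih hnd' _ hml

lemma pv_get?_pvPopCols (uniq : List String) (hnd : uniq.Nodup) (S : List String)
    (cols : PySem.Dict String (List String)) (num : String) (hm : num ∈ uniq) :
    (pvPopCols uniq S cols).get? num
      = if S.filter (fun s => PySem.Str.isIn num s) = [] then cols.get? num
        else some (cols.getD num [] ++ S.filter (fun s => PySem.Str.isIn num s)) := by
  induction S generalizing cols with
  | nil => simp [pvPopCols]
  | cons s S ih =>
    have hstep : pvPopCols uniq (s :: S) cols
        = pvPopCols uniq S (uniq.foldl (fun cols num =>
            if PySem.Str.isIn num s then cols.modify num [] (· ++ [s]) else cols) cols) := rfl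
    rw [hstep, ih _, List.filter_cons]
    have hget := pv_get?_numfold_self uniq hnd s cols num hm
    by_cases hq : PySem.Str.isIn num s = true
    · rw [if_pos hq] at hget
      have hgetD : (uniq.foldl (fun cols n =>
          if PySem.Str.isIn n s then cols.modify n [] (· ++ [s]) else cols) cols).getD num []
          = cols.getD num [] ++ [s] := by
        unfold PySem.Dict.getD
        rw [hget]; rfl
      rw [if_pos hq, if_neg (List.cons_ne_nil _ _), hget, hgetD]
      by_cases hS : S.filter (fun t => PySem.Str.isIn num t) = []
      · rw [if_pos hS, hS]
      · rw [if_neg hS]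
        simp [List.append_assoc]
    · rw [if_neg hq] at hget
      have hgetD : (uniq.foldl (fun cols n =>
          if PySem.Str.isIn n s then cols.modify n [] (· ++ [s]) else cols) cols).getD num []
          = cols.getD num [] := by
        unfold PySem.Dict.getD
        rw [hget]
      rw [if_neg hq, hget, hgetD]

lemma pv_get?_popentry_self (uniq : List String) (S : List String)
    (b : PySem.Dict String (PySem.Dict String (List String))) (K : String) (inn : PySem.Dict String (List String))
    (h : b.get? K = some inn) :
    (S.foldl (fun b s =>
        uniq.foldl (fun b num =>
            if PySem.Str.isIn num s then
              b.modify K PySem.Dict.empty (fun cols => cols.modify num [] (· ++ [s]))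
            else b) b) b).get? K = some (pvPopCols uniq S inn) := by
  induction S generalizing b inn with
  | nil => simpa [pvPopCols] using h
  | cons s S ih =>
    simp only [List.foldl_cons]
    have hstep : pvPopCols uniq (s :: S) inn
        = pvPopCols uniq S (uniq.foldl (fun cols num =>
            if PySem.Str.isIn num s then cols.modify num [] (· ++ [s]) else cols) inn) := rfl
    rw [hstep]
    refine ih _ _ ?_
    have hg := pv_get?_foldl_guard_modify_self uniq (fun num => PySem.Str.isIn num s) K
        PySem.Dict.empty (fun cols num => cols.modify num [] (· ++ [s])) b inn h
    rw [hg]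

lemma pv_get?_popentry_ne (uniq : List String) (S : List String)
    (b : PySem.Dict String (PySem.Dict String (List String))) (K o : String) (h : o ≠ K) :
    (S.foldl (fun b s =>
        uniq.foldl (fun b num =>
            if PySem.Str.isIn num s then
              b.modify K PySem.Dict.empty (fun cols => cols.modify num [] (· ++ [s]))
            else b) b) b).get? o = b.get? o := by
  induction S generalizing b with
  | nil => rfl
  | cons s S ih =>
    simp only [List.foldl_cons]
    rw [ih]
    exact pv_get?_foldl_guard_modify_ne uniq (fun num => PySem.Str.isIn num s) K o
      PySem.Dict.empty (fun cols num => cols.modify num [] (· ++ [s])) b h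

lemma pv_keys_popentry (uniq : List String) (S : List String)
    (b : PySem.Dict String (PySem.Dict String (List String))) (K : String) (h : b.contains K = true) :
    (S.foldl (fun b s =>
        uniq.foldl (fun b num =>
            if PySem.Str.isIn num s then
              b.modify K PySem.Dict.empty (fun cols => cols.modify num [] (· ++ [s]))
            else b) b) b).keys = b.keys := by
  induction S generalizing b with
  | nil => rfl
  | cons s S ih =>
    simp only [List.foldl_cons]
    rw [ih _ (by
      rw [pv_contains_eq_any_keys,
        pv_keys_foldl_guard_modify uniq (fun num => PySem.Str.isIn num s) K PySem.Dict.empty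
          (fun cols num => cols.modify num [] (· ++ [s])) b h,
        ← pv_contains_eq_any_keys]
      exact h)]
    exact pv_keys_foldl_guard_modify uniq (fun num => PySem.Str.isIn num s) K PySem.Dict.empty
      (fun cols num => cols.modify num [] (· ++ [s])) b h

lemma pv_get?_popfold (uniq : List String) (entries : List ((String × String) × List String))
    (b : PySem.Dict String (PySem.Dict String (List String))) (o : String) (inn : PySem.Dict String (List String))
    (h : b.get? o = some inn) :
    (entries.foldl (fun b e =>
        if b.contains e.1.1 then
          e.2.foldl (fun b s =>
              uniq.foldl (fun b num =>
                  if PySem.Str.isIn num s then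
                    b.modify e.1.1 PySem.Dict.empty (fun cols => cols.modify num [] (· ++ [s]))
                  else b) b) b
        else b) b).get? o
      = some (entries.foldl (fun inn e => if e.1.1 == o then pvPopCols uniq e.2 inn else inn) inn) := by
  induction entries generalizing b inn with
  | nil => simpa using h
  | cons e entries ih =>
    simp only [List.foldl_cons]
    by_cases he : e.1.1 == o
    · have heq : e.1.1 = o := eq_of_beq he
      have hc : b.contains e.1.1 = true := by
        rw [heq, PySem.Dict.contains_eq_isSome_get?, h]; rfl
      simp only [he, if_true, hc]
      exact ih _ _ (by rw [← heq] at h ⊢; exact pv_get?_popentry_self uniq e.2 b e.1.1 inn h)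
    · have hne : o ≠ e.1.1 := fun hh => he (by rw [hh]; exact BEq.rfl)
      simp only [he]
      by_cases hc : b.contains e.1.1 = true
      · simp only [hc, if_true]
        exact ih _ _ (by rw [pv_get?_popentry_ne uniq e.2 b e.1.1 o hne]; exact h)
      · simp only [hc]
        exact ih _ _ h

lemma pv_keys_popfold (uniq : List String) (entries : List ((String × String) × List String))
    (b : PySem.Dict String (PySem.Dict String (List String))) :
    (entries.foldl (fun b e =>
        if b.contains e.1.1 then
          e.2.foldl (fun b s =>
              uniq.foldl (fun b num =>
                  if PySem.Str.isIn num s then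
                    b.modify e.1.1 PySem.Dict.empty (fun cols => cols.modify num [] (· ++ [s]))
                  else b) b) b
        else b) b).keys = b.keys := by
  induction entries generalizing b with
  | nil => rfl
  | cons e entries ih =>
    simp only [List.foldl_cons]
    by_cases hc : b.contains e.1.1 = true
    · simp only [hc, if_true]
      rw [ih _]
      · exact pv_keys_popentry uniq e.2 b e.1.1 hc
    · simp only [hc]
      exact ih b

lemma pv_popAll_eq_bucket (uniq : List String) (entries : List ((String × String) × List String)) (o : String) :
    entries.foldl (fun inn e => if e.1.1 == o then pvPopCols uniq e.2 inn else inn) PySem.Dict.empty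
      = pvBucket uniq entries o := by
  rw [pvBucket, pvSamplesOf,
    show pvPopCols uniq ((entries.filter (fun e => e.1.1 == o)).flatMap (fun e => e.2)) PySem.Dict.empty
        = ((entries.filter (fun e => e.1.1 == o)).flatMap (fun e => e.2)).foldl
            (fun cols s => uniq.foldl (fun cols num =>
                if PySem.Str.isIn num s then cols.modify num [] (· ++ [s]) else cols) cols)
            PySem.Dict.empty from rfl,
    List.foldl_flatMap, List.foldl_filter]
  rfl

lemma pv_buckets_items (uniq : List String) (entries : List ((String × String) × List String)) (lo : List String) :
    ((entries.foldl (fun b e =>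
        if b.contains e.1.1 then
          e.2.foldl (fun b s =>
              uniq.foldl (fun b num =>
                  if PySem.Str.isIn num s then
                    b.modify e.1.1 PySem.Dict.empty (fun cols => cols.modify num [] (· ++ [s]))
                  else b) b) b
        else b)
      (lo.foldl (fun b o => b.insert o PySem.Dict.empty) PySem.Dict.empty))).items
      = (PySem.List.dedup lo).map (fun o => (o, pvBucket uniq entries o)) := by
  have hb0 : ∀ k, ((lo.foldl (fun b o => b.insert o PySem.Dict.empty) PySem.Dict.empty)
        : PySem.Dict String (PySem.Dict String (List String))).get? k
      = if k ∈ lo then some PySem.Dict.empty else none := by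
    intro k
    rw [pv_get?_foldl_insert_fun (fun _ => PySem.Dict.empty) lo _ k, PySem.Dict.get?_empty]
  have hkeys0 : ((lo.foldl (fun b o => b.insert o PySem.Dict.empty) PySem.Dict.empty)
        : PySem.Dict String (PySem.Dict String (List String))).keys = PySem.List.dedup lo := by
    rw [PySem.Dict.keys_foldl_insert lo (fun _ _ => PySem.Dict.empty), PySem.Dict.keys_empty,
      pv_set_update_nil_eq_dedup]
  have hkeys : ((entries.foldl (fun b e =>
        if b.contains e.1.1 then
          e.2.foldl (fun b s =>
              uniq.foldl (fun b num =>
                  if PySem.Str.isIn num s then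
                    b.modify e.1.1 PySem.Dict.empty (fun cols => cols.modify num [] (· ++ [s]))
                  else b) b) b
        else b)
      (lo.foldl (fun b o => b.insert o PySem.Dict.empty) PySem.Dict.empty))).keys
      = PySem.List.dedup lo := by
    rw [pv_keys_popfold uniq entries _, hkeys0]
  rw [PySem.Dict.items_eq_map_keys _ (hkeys ▸ PySem.List.nodup_dedup lo) PySem.Dict.empty, hkeys]
  refine List.map_congr_left (fun o ho => ?_)
  have hol : o ∈ lo := (PySem.List.mem_dedup lo o).1 ho
  have hget := pv_get?_popfold uniq entries
      (lo.foldl (fun b o => b.insert o PySem.Dict.empty) PySem.Dict.empty) o PySem.Dict.empty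
      (by rw [hb0, if_pos hol])
  rw [pv_popAll_eq_bucket] at hget
  refine congrArg (fun x => (o, x)) ?_
  unfold PySem.Dict.getD
  rw [hget]
  rfl

lemma pv_reorder_eq_innerCanon (entries : List ((String × String) × List String)) (sn : List String) (o : String) :
    (sn.foldl (fun td num =>
        if (pvBucket (PySem.List.dedup sn) entries o).contains num then
          td.insert num ((pvBucket (PySem.List.dedup sn) entries o).getD num [])
        else td) PySem.Dict.empty).items
      = pvInnerCanon entries sn o := by
  have hg : ∀ num ∈ sn, (pvBucket (PySem.List.dedup sn) entries o).get? num
      = if pvFlt entries o num = [] then none else some (pvFlt entries o num) := by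
    intro num hnum
    have h := pv_get?_pvPopCols (PySem.List.dedup sn) (PySem.List.nodup_dedup sn)
        (pvSamplesOf entries o) PySem.Dict.empty num ((PySem.List.mem_dedup sn num).2 hnum)
    rw [pvBucket, h, PySem.Dict.get?_empty]
    rfl
  rw [← List.foldl_filter, pv_items_foldl_insert_fun _ _ []]
  unfold pvInnerCanon
  rw [List.filter_congr (fun num hnum => by
      rw [PySem.Dict.contains_eq_isSome_get?, hg num hnum]
      by_cases hf : pvFlt entries o num = []
      · simp [hf]
      · simp [hf, List.length_eq_zero_iff]
      : ∀ num ∈ sn, ((pvBucket (PySem.List.dedup sn) entries o).contains num)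
          = ((pvFlt entries o num).length != 0))]
  refine List.map_congr_left (fun num hnum => ?_)
  have h1 := List.mem_filter.1 ((PySem.List.mem_dedup _ num).1 hnum)
  have hf : pvFlt entries o num ≠ [] := by
    intro h0
    rw [h0] at h1
    simp at h1
  refine congrArg (fun x => (num, x)) ?_
  unfold PySem.Dict.getD
  rw [hg num h1.1, if_neg hf]
  rfl

lemma pv_B_eq_canon (d : List (String × String × List String)) (lo sn : List String) :
    get_column_names_organ_sheets_alt d lo sn = pvCanon d lo sn := by
  unfold get_column_names_organ_sheets_alt pvCanon
  dsimp only
  rw [pv_buckets_items (PySem.List.dedup sn) (pvEntries d) lo]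
  rw [PySem.Dict.items_foldl_insert_fresh
      ((PySem.List.dedup lo).map (fun o => (o, pvBucket (PySem.List.dedup sn) (pvEntries d) o)))
      (fun p => p.1)
      (fun p => ((sn.foldl (fun td num =>
          if p.2.contains num then td.insert num (p.2.getD num []) else td)
        PySem.Dict.empty).items)) PySem.Dict.empty
      (fun a _ => by simp [PySem.Dict.contains, PySem.Dict.empty])
      (by rw [List.map_map]
          have hid : ((fun p : String × PySem.Dict String (List String) => p.1) ∘
              (fun o => (o, pvBucket (PySem.List.dedup sn) (pvEntries d) o))) = id := rfl
          rw [hid, List.map_id]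
          exact PySem.List.nodup_dedup lo)]
  simp only [List.map_map]
  rw [show (PySem.Dict.empty : PySem.Dict String (List (String × List String))).items = [] from rfl,
    List.nil_append]
  refine List.map_congr_left (fun o ho => ?_)
  exact congrArg (fun x => (o, x)) (pv_reorder_eq_innerCanon (pvEntries d) sn o)

-- ===== VERDICT (by name: the statement is the Claim_ definition above) =====
theorem get_column_names_organ_sheets_spec : Claim_equal_get_column_names_organ_sheets := by
  intro d lo sn _
  unfold Spec_get_column_names_organ_sheets
  rw [pv_A_eq_canon, pv_B_eq_canon]
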